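-- pv_equiv track=rewrite | github.com/le314u/Academico | IFMG/Projeto Analise Algoritimo/EX3/tp3.py | charElementInt
-- ===== SOURCE A (Python) =====
-- def charElementInt(indice, base, elemento, partida):
--     """Calcula qual o indice de um caracter em uma lista Lexicocrafica dado o elemento em que se encontra tal indice"""
--     nDigits = len(elemento)
--     aritimetica = 0
--     for i in range(nDigits):
--         #Aritimetica
--         aritimetica = aritimetica + (elemento[i]-1)* base ** (nDigits-i-1)
--     movimentos = aritimetica * nDigits
--     indice = (partida + movimentos)
--     return indice
-- ===== SOURCE B (Python) =====
-- def charElementInt(indice, base, elemento, partida):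
--     """Horner's method: one pass, no exponentiation."""
--     acc = 0
--     for d in elemento:
--         acc = acc * base + (d - 1)
--     return partida + acc * len(elemento)
-- ===== Notes on version B (the rewrite author's own statement) =====
-- stated objective: faster
-- what changed: Replaced the per-digit computation of base**(n-i-1) inside the loop by a single Horner pass (acc = acc*base + digit-1), removing all explicit exponentiations.
import Mathlib
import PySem

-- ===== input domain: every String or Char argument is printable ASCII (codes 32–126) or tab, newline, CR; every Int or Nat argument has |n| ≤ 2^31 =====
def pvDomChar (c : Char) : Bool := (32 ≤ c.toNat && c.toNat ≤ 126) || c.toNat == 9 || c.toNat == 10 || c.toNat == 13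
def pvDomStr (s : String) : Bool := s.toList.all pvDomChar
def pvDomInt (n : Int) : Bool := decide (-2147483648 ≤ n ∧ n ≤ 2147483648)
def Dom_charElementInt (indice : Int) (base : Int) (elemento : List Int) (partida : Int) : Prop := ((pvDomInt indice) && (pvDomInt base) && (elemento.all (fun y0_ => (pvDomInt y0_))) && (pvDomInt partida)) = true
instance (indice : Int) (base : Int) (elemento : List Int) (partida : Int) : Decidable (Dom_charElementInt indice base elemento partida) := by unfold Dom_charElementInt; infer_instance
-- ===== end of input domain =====

-- B replaces A's per-index loop of explicit exponentiations base**(nDigits-i-1) by a single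
-- Horner pass over the digits (objective: faster, O(n) multiplications instead of O(n^2)).

-- ===== PORT A =====
def charElementInt (indice : Int) (base : Int) (elemento : List Int) (partida : Int) : Int :=
  let nDigits : Int := elemento.length
  let aritimetica := (PySem.List.pyRange 0 nDigits 1).foldl
    (fun acc i => acc + (PySem.List.pyGetD elemento i 0 - 1) * base ^ (nDigits - i - 1).toNat) 0
  let movimentos := aritimetica * nDigits
  partida + movimentos

-- ===== PORT B =====
def charElementInt_alt (indice : Int) (base : Int) (elemento : List Int) (partida : Int) : Int :=
  partida + (elemento.foldl (fun acc d => acc * base + (d - 1)) 0) * elemento.length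

-- ===== PRECONDITION & SPEC =====
def Spec_charElementInt (indice : Int) (base : Int) (elemento : List Int) (partida : Int) (out : Int) : Prop := out = charElementInt_alt indice base elemento partida
instance (indice : Int) (base : Int) (elemento : List Int) (partida : Int) (out : Int) : Decidable (Spec_charElementInt indice base elemento partida out) := by unfold Spec_charElementInt; infer_instance

-- ===== CLAIM (what is proved, stated in full; the proofs are below) =====
def Claim_equal_charElementInt : Prop := ∀ (indice : Int) (base : Int) (elemento : List Int) (partida : Int), Dom_charElementInt indice base elemento partida → Spec_charElementInt indice base elemento partida (charElementInt indice base elemento partida)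

-- ===== LEMMAS AND PROOFS =====

-- The positional sum Σ_k (l[k]-1)*base^(n-1-k) equals the Horner fold of B.
lemma sum_pow_eq_horner (base : Int) (l : List Int) :
    ((List.range l.length).map
      (fun k => (l.getD k 0 - 1) * base ^ (l.length - 1 - k))).sum
    = l.foldl (fun acc d => acc * base + (d - 1)) 0 := by
  induction l using List.reverseRecOn with
  | nil => simp
  | append_singleton l d ih =>
    rw [List.foldl_append]
    simp only [List.length_append, List.length_singleton, List.range_succ, List.map_append,
      List.sum_append, List.map_singleton, List.sum_singleton]
    have h1 : ∀ k ∈ List.range l.length,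
        ((l ++ [d]).getD k 0 - 1) * base ^ (l.length + 1 - 1 - k)
        = ((l.getD k 0 - 1) * base ^ (l.length - 1 - k)) * base := by
      intro k hk
      rw [List.mem_range] at hk
      rw [List.getD_append _ _ _ _ hk]
      have : l.length + 1 - 1 - k = (l.length - 1 - k) + 1 := by omega
      rw [this, pow_succ]; ring
    rw [List.map_congr_left h1]
    have h2 : (l ++ [d]).getD l.length 0 = d := by
      simp [List.getD]
    rw [h2]
    have h3 : (List.map (fun a => (l.getD a 0 - 1) * base ^ (l.length - 1 - a) * base) (List.range l.length)).sum
        = (List.map (fun k => (l.getD k 0 - 1) * base ^ (l.length - 1 - k)) (List.range l.length)).sum * base :=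
      List.sum_map_mul_right _ _ _
    have h4 : l.length + 1 - 1 - l.length = 0 := by omega
    rw [h3, ih, h4, pow_zero, List.foldl_cons, List.foldl_nil]
    ring

-- A's indexed loop over range(nDigits) computes the Horner fold.
lemma loopA_eq (base : Int) (l : List Int) :
    (PySem.List.pyRange 0 (l.length : Int) 1).foldl
      (fun acc i => acc + (PySem.List.pyGetD l i 0 - 1) * base ^ (((l.length : Int) - i - 1)).toNat) 0
    = l.foldl (fun acc d => acc * base + (d - 1)) 0 := by
  rw [PySem.List.foldl_add]
  rw [PySem.List.pyRange_one]
  simp only [sub_zero, Int.toNat_natCast, List.map_map]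
  rw [← sum_pow_eq_horner base l]
  rw [zero_add]
  congr 1
  apply List.map_congr_left
  intro k hk
  rw [List.mem_range] at hk
  simp only [Function.comp]
  rw [zero_add, PySem.List.pyGetD_natCast]
  congr 2
  omega

-- ===== VERDICT (by name: the statement is the Claim_ definition above) =====
theorem charElementInt_spec : Claim_equal_charElementInt := by
  intro indice base elemento partida _
  unfold Spec_charElementInt charElementInt charElementInt_alt
  simp only []
  rw [loopA_eq]
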